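-- pv_equiv track=rewrite | github.com/rickreynolds1969/pet_chessreplay | pgn_to_pet.py | token_starts_with_movenum
-- ===== SOURCE A (Python) =====
-- def token_starts_with_movenum(token):
--     seen_num = False
--     for ch in token:
--         if ch in '0123456789.':
--             seen_num = True
--         else:
--             if seen_num is False:
--                 return False
--     return True
-- ===== SOURCE B (Python) =====
-- def token_starts_with_movenum(token):
--     return len(token) == 0 or token[0] in '0123456789.'
-- ===== Notes on version B (the rewrite author's own statement) =====
-- stated objective: simpler
-- what changed: Replaces the accumulator loop with a constant-time closed-form test of emptiness or the first character, since A returns False exactly when the first character is not a digit/dot.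
import Mathlib
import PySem

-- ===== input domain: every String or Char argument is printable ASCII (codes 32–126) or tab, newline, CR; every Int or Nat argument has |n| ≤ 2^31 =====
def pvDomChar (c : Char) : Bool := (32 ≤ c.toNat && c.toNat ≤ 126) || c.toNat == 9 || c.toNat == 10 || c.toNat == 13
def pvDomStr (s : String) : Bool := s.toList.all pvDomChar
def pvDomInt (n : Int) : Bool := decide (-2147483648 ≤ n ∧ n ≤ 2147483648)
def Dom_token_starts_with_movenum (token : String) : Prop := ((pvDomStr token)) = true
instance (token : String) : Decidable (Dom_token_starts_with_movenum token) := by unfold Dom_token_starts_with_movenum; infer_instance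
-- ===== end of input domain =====

-- B replaces A's accumulator loop by a constant-time first-character test (simpler).


-- ===== PORT A =====
-- the for-loop with early return, as structural recursion over the characters with the seen_num state
def tswmLoop : List Char → Bool → Bool
  | [], _ => true
  | ch :: rest, seen =>
    if ("0123456789.".toList.contains ch) then tswmLoop rest true
    else if seen = false then false else tswmLoop rest seen

def token_starts_with_movenum (token : String) : Bool :=
  tswmLoop token.toList false

-- ===== PORT B =====
-- closed form: empty token, or first character among '0123456789.'
def token_starts_with_movenum_alt (token : String) : Bool :=
  match token.toList with
  | [] => true
  | c :: _ => "0123456789.".toList.contains c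

-- ===== PRECONDITION & SPEC =====
def Spec_token_starts_with_movenum (token : String) (out : Bool) : Prop := out = token_starts_with_movenum_alt token
instance (token : String) (out : Bool) : Decidable (Spec_token_starts_with_movenum token out) := by unfold Spec_token_starts_with_movenum; infer_instance

-- ===== CLAIM (what is proved, stated in full; the proofs are below) =====
def Claim_equal_token_starts_with_movenum : Prop := ∀ (token : String), Dom_token_starts_with_movenum token → Spec_token_starts_with_movenum token (token_starts_with_movenum token)

-- ===== LEMMAS AND PROOFS =====
-- once seen_num is true the loop can no longer return False
theorem tswmLoop_true (xs : List Char) : tswmLoop xs true = true := by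
  induction xs with
  | nil => rfl
  | cons c rest ih => simp [tswmLoop, ih]

-- ===== VERDICT (by name: the statement is the Claim_ definition above) =====
theorem token_starts_with_movenum_spec : Claim_equal_token_starts_with_movenum := by
  intro token _
  unfold Spec_token_starts_with_movenum token_starts_with_movenum token_starts_with_movenum_alt
  cases h : token.toList with
  | nil => simp [tswmLoop]
  | cons c rest =>
    by_cases hc : "0123456789.".toList.contains c = true <;>
      simp [tswmLoop, tswmLoop_true]
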